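-- pv_equiv track=rewrite | github.com/gmthu66/AbAgIPA | SabDab/data_code/spilt_family.py | partition_into_groups
-- ===== SOURCE A (Python) =====
-- def partition_into_groups(nums, num_groups):
--     # 计算每个组的目标元素和
--     target_sum = sum(nums) // num_groups
--
--     # 初始化组和当前组元素和
--     groups = [[] for _ in range(num_groups)]
--     current_group_sum = [0] * num_groups
--
--     # 将元素按降序排列
--     sorted_indices = sorted(range(len(nums)), key=lambda i: nums[i], reverse=True)
--
--     # 贪心地将元素放入组中
--     for index in sorted_indices:
--         # 选择当前组中元素和最小的组
--         current_group = min(range(num_groups), key=lambda i: current_group_sum[i])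
--
--         # 将元素放入当前组
--         groups[current_group].append(index)
--
--         # 更新当前组元素和
--         current_group_sum[current_group] += nums[index]
--
--     return groups
--
-- nums = [73, 82, 50, 47, 63, 67, 90, 54, 87, 89, 43, 72, 68, 66, 58, 77, 96, 51, 75, 64, 81, 65, 74, 61, 79, 57, 93, 60, 52, 94, 49, 80, 91, 62, 86, 78, 48, 92, 46, 69, 56, 55, 84, 76, 71, 88, 70, 85, 83, 53, 59, 45, 44, 95, 98, 97, 99, 100, 101, 102, 103, 104, 105, 106, 107, 108, 109, 110, 111, 112, 113, 114, 115, 116, 117, 118, 119, 120, 121, 122, 123, 124, 125, 126, 127, 128, 129, 130, 131, 132, 133, 134, 135, 136, 137, 138, 139, 140, 141, 142, 143, 144, 145, 146, 147, 148, 149]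
-- ===== SOURCE B (Python) =====
-- def partition_into_groups(nums, num_groups):
--     # Greedy balancing via a sorted queue of (group_sum, group_index) kept in
--     # ascending lexicographic order: take the head instead of scanning for the min.
--     groups = [[] for _ in range(num_groups)]
--     queue = [(0, g) for g in range(num_groups)]  # already sorted
--     for index in sorted(range(len(nums)), key=lambda i: nums[i], reverse=True):
--         s, g = queue.pop(0)
--         groups[g].append(index)
--         item = (s + nums[index], g)
--         k = 0
--         while k < len(queue) and queue[k] <= item:
--             k += 1
--         queue.insert(k, item)
--     return groups
-- ===== Notes on version B (the rewrite author's own statement) =====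
-- stated objective: alternative
-- what changed: B replaces A's per-element argmin scan over all group sums by a queue of (sum, group) pairs kept sorted in ascending lexicographic order: the lightest group is popped from the head and re-inserted at its sorted position, preserving A's smallest-index tie-break.
import Mathlib
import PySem

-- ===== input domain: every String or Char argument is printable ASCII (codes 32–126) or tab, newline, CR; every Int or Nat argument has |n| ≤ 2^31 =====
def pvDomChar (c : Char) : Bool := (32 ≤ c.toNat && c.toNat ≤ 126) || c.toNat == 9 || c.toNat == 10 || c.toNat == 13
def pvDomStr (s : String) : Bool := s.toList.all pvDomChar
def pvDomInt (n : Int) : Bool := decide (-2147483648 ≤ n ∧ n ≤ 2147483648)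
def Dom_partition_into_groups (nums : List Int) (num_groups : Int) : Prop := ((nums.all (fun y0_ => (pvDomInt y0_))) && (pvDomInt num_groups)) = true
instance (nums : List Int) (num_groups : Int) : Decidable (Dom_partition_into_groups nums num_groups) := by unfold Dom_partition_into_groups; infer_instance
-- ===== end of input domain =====

-- B maintains the (sum, group) pairs as a lexicographically sorted queue (pop head,
-- ordered re-insert) instead of A's per-element argmin scan over all group sums;
-- same return value, objective: alternative structure.


-- ===== PORT A =====
-- loop body: pick the first group of minimal current sum (min over range(num_groups)),
-- append the index to it, add nums[index] to its sum.
def pigLoopA (nums : List Int) (num_groups : Int)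
    (st : List (List Int) × List Int) (index : Int) : List (List Int) × List Int :=
  match PySem.List.min? (PySem.List.pyRange 0 num_groups 1)
      (fun i => PySem.List.pyGetD st.2 i 0) with
  | none => st      -- min() over an empty range raises ValueError; unreachable under Pre_
  | some cg =>
      (PySem.List.pySetD st.1 cg (PySem.List.pyGetD st.1 cg [] ++ [index]),
       PySem.List.pySetD st.2 cg
         (PySem.List.pyGetD st.2 cg 0 + PySem.List.pyGetD nums index 0))

def partition_into_groups (nums : List Int) (num_groups : Int) : List (List Int) :=
  -- target_sum = sum(nums) // num_groups is computed and never used; it raises iff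
  -- num_groups = 0, which Pre_ excludes, so the unused binding is dropped here.
  let groups := (PySem.List.pyRange 0 num_groups 1).map (fun _ => ([] : List Int))
  -- [0] * num_groups (empty for num_groups ≤ 0, exactly like Python)
  let current_group_sum := List.replicate num_groups.toNat (0 : Int)
  let sorted_indices := PySem.List.sorted (PySem.List.pyRange 0 (PySem.List.len nums) 1)
      (fun i => PySem.List.pyGetD nums i 0) true
  (sorted_indices.foldl (pigLoopA nums num_groups) (groups, current_group_sum)).1

-- ===== PORT B =====
-- Python tuple comparison 'queue[k] <= item' (lexicographic on (sum, group))
def pigLexLe (a b : Int × Int) : Bool :=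
  a.1 < b.1 || (a.1 == b.1 && a.2 ≤ b.2)

-- the 'k = 0; while k < len(queue) and queue[k] <= item: k += 1; queue.insert(k, item)' scan
def pigInsort (x : Int × Int) : List (Int × Int) → List (Int × Int)
  | [] => [x]
  | y :: t => if pigLexLe y x then y :: pigInsort x t else x :: y :: t

-- loop body: s, g = queue.pop(0); groups[g].append(index); ordered re-insert of (s + nums[index], g)
def pigLoopB (nums : List Int)
    (st : List (List Int) × List (Int × Int)) (index : Int) :
    List (List Int) × List (Int × Int) :=
  match st.2 with
  | [] => st      -- queue.pop(0) on an empty queue raises IndexError; unreachable under Pre_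
  | (s, g) :: rest =>
      (PySem.List.pySetD st.1 g (PySem.List.pyGetD st.1 g [] ++ [index]),
       pigInsort (s + PySem.List.pyGetD nums index 0, g) rest)

def partition_into_groups_alt (nums : List Int) (num_groups : Int) : List (List Int) :=
  let groups := (PySem.List.pyRange 0 num_groups 1).map (fun _ => ([] : List Int))
  let queue := (PySem.List.pyRange 0 num_groups 1).map (fun g => ((0 : Int), g))
  let order := PySem.List.sorted (PySem.List.pyRange 0 (PySem.List.len nums) 1)
      (fun i => PySem.List.pyGetD nums i 0) true
  (order.foldl (pigLoopB nums) (groups, queue)).1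

-- ===== PRECONDITION & SPEC =====
-- Pre_ excludes exactly the inputs where A raises: num_groups = 0 (ZeroDivisionError in
-- the unused target_sum) and num_groups < 0 with nums nonempty (ValueError: min() of an
-- empty range).  For nums = [] with num_groups < 0 A returns [] and is kept inside Pre_.
def Pre_partition_into_groups (nums : List Int) (num_groups : Int) : Prop :=
  0 < num_groups ∨ (nums = [] ∧ num_groups < 0)
instance (nums : List Int) (num_groups : Int) : Decidable (Pre_partition_into_groups nums num_groups) := by
  unfold Pre_partition_into_groups; infer_instance

def pvWitness_partition_into_groups : List Int × Int := ([3, 1, 2], 2)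

def Spec_partition_into_groups (nums : List Int) (num_groups : Int) (out : List (List Int)) : Prop :=
  out = partition_into_groups_alt nums num_groups
instance (nums : List Int) (num_groups : Int) (out : List (List Int)) : Decidable (Spec_partition_into_groups nums num_groups out) := by
  unfold Spec_partition_into_groups; infer_instance

-- ===== CLAIM (what is proved, stated in full; the proofs are below) =====
def Claim_equal_partition_into_groups : Prop := ∀ (nums : List Int) (num_groups : Int), Dom_partition_into_groups nums num_groups → Pre_partition_into_groups nums num_groups → Spec_partition_into_groups nums num_groups (partition_into_groups nums num_groups)

-- ===== LEMMAS AND PROOFS =====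


-- the multiset A's sum list carries, as (sum, group-index) pairs
def pigPairs (sums : List Int) : List (Int × Int) :=
  (List.range sums.length).map (fun j => (sums.getD j 0, (j : Int)))

-- strict lexicographic order on (sum, group-index) pairs
def pigLt (a b : Int × Int) : Prop := a.1 < b.1 ∨ (a.1 = b.1 ∧ a.2 < b.2)

theorem pigLt_of_le_of_ne {a b : Int × Int} (h : pigLexLe a b = true) (h2 : a.2 ≠ b.2) :
    pigLt a b := by
  simp [pigLexLe] at h; unfold pigLt; omega

theorem pigLt_of_not_le {a b : Int × Int} (h : pigLexLe a b = false) : pigLt b a := by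
  simp [pigLexLe] at h; unfold pigLt; omega

theorem pigLt_trans {a b c : Int × Int} (h1 : pigLt a b) (h2 : pigLt b c) : pigLt a c := by
  unfold pigLt at *; omega

theorem pigInsort_perm (x : Int × Int) (l : List (Int × Int)) :
    (pigInsort x l).Perm (x :: l) := by
  induction l with
  | nil => simp [pigInsort]
  | cons y t ih =>
      simp only [pigInsort]
      split
      · exact ((ih.cons y).trans (List.Perm.swap x y t))
      · exact List.Perm.refl _

theorem pigInsort_pairwise (x : Int × Int) (l : List (Int × Int))
    (hp : l.Pairwise pigLt) (hd : ∀ y ∈ l, y.2 ≠ x.2) :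
    (pigInsort x l).Pairwise pigLt := by
  induction l with
  | nil => simp [pigInsort]
  | cons y t ih =>
      rw [List.pairwise_cons] at hp
      simp only [pigInsort]
      split
      · rename_i hle
        refine List.pairwise_cons.mpr ⟨?_, ih hp.2 (fun z hz => hd z (List.mem_cons_of_mem _ hz))⟩
        intro z hz
        rcases List.mem_cons.mp ((pigInsort_perm x t).mem_iff.mp hz) with rfl | hz'
        · exact pigLt_of_le_of_ne hle (hd y List.mem_cons_self)
        · exact hp.1 z hz'
      · rename_i hle
        refine List.pairwise_cons.mpr ⟨?_, List.pairwise_cons.mpr ⟨hp.1, hp.2⟩⟩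
        intro z hz
        rcases List.mem_cons.mp hz with rfl | hz'
        · exact pigLt_of_not_le (Bool.eq_false_iff.mpr (by simpa using hle))
        · exact pigLt_trans (pigLt_of_not_le (Bool.eq_false_iff.mpr (by simpa using hle))) (hp.1 z hz')


theorem pigMinKeep {α κ : Type} [LinearOrder κ] (key : α → κ) (m : α) (l : List α)
    (h : ∀ y ∈ l, key m ≤ key y) :
    l.foldl (fun acc x => match acc with
      | none => some x
      | some mm => if key x < key mm then some x else some mm) (some m) = some m := by
  induction l with
  | nil => rfl
  | cons y t ih =>
      simp only [List.foldl_cons]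
      rw [if_neg (not_lt.mpr (h y List.mem_cons_self))]
      exact ih (fun z hz => h z (List.mem_cons_of_mem _ hz))

theorem pigMin_first {α κ : Type} [LinearOrder κ] (key : α → κ) (pre post : List α) (m : α)
    (h1 : ∀ y ∈ pre, key m < key y) (h2 : ∀ y ∈ post, key m ≤ key y) :
    PySem.List.min? (pre ++ m :: post) key = some m := by
  have hstep : PySem.List.min? (pre ++ m :: post) key
      = List.foldl (fun acc x => match acc with
          | none => some x
          | some mm => if key x < key mm then some x else some mm)
          (PySem.List.min? pre key) (m :: post) := by
    simp only [PySem.List.min?, List.foldl_append]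
    rfl
  rw [hstep]
  cases h : PySem.List.min? pre key with
  | none =>
      simp only [List.foldl_cons]
      exact pigMinKeep key m post h2
  | some z =>
      have hz := PySem.List.min?_mem h
      simp only [List.foldl_cons]
      rw [if_pos (h1 z hz)]
      exact pigMinKeep key m post h2

theorem pigPairs_length (sums : List Int) : (pigPairs sums).length = sums.length := by
  simp [pigPairs]

theorem pigPairs_getElem (sums : List Int) (j : Nat) (h : j < sums.length) :
    (pigPairs sums)[j]'(by simp [pigPairs, h]) = (sums.getD j 0, (j : Int)) := by
  simp [pigPairs]

theorem pigPairs_set (sums : List Int) (j : Nat) (w : Int) (h : j < sums.length) :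
    pigPairs (sums.set j w) = (pigPairs sums).set j (w, (j : Int)) := by
  apply List.ext_getElem
  · simp [pigPairs]
  · intro k h1 h2
    simp only [pigPairs, List.length_set, List.length_map, List.length_range] at h1 h2 ⊢
    simp only [List.getElem_map, List.getElem_range, List.getElem_set]
    rcases eq_or_ne j k with rfl | hne
    · simp [List.getD_eq_getElem?_getD, h]
    · simp only [if_neg hne]
      have hk : k < sums.length := by simpa using h2
      rw [List.getD_eq_getElem _ _ (by simpa using h1), List.getD_eq_getElem _ _ hk,
        List.getElem_set, if_neg hne]

theorem pigPairs_snd_nodup (sums : List Int) : ((pigPairs sums).map Prod.snd).Nodup := by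
  simp only [pigPairs, List.map_map]
  exact List.Nodup.map (fun a b hab => by simpa using hab) List.nodup_range

theorem pigRest_snd (sums : List Int) (s g : Int) (rest : List (Int × Int))
    (hperm : ((s, g) :: rest).Perm (pigPairs sums)) :
    ∀ y ∈ rest, y.2 ≠ g := by
  have hnodup : (((s, g) :: rest).map Prod.snd).Nodup :=
    ((hperm.map Prod.snd).nodup_iff).mpr (pigPairs_snd_nodup sums)
  simp only [List.map_cons, List.nodup_cons] at hnodup
  intro y hy hcontra
  exact hnodup.1 (hcontra ▸ List.mem_map_of_mem hy)

theorem pigHead (sums : List Int) (s : Int) (j : Nat) (rest : List (Int × Int))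
    (hperm : ((s, (j : Int)) :: rest).Perm (pigPairs sums))
    (hpw : ((s, (j : Int)) :: rest).Pairwise pigLt) :
    j < sums.length ∧ sums.getD j 0 = s ∧
      PySem.List.min? (PySem.List.pyRange 0 ((sums.length : Int)) 1)
        (fun i => PySem.List.pyGetD sums i 0) = some (j : Int) := by
  have hmem : (s, (j : Int)) ∈ pigPairs sums := hperm.mem_iff.mp List.mem_cons_self
  simp only [pigPairs, List.mem_map, List.mem_range] at hmem
  obtain ⟨j', hj', hpair⟩ := hmem
  have hjj : j' = j := by
    have := congrArg Prod.snd hpair; simpa using this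
  subst hjj
  have hs : sums.getD j' 0 = s := congrArg Prod.fst hpair
  refine ⟨hj', hs, ?_⟩
  have hforall : ∀ k : Nat, k < sums.length → k ≠ j' → pigLt (s, (j' : Int)) (sums.getD k 0, (k : Int)) := by
    intro k hk hkj
    have hmemk : (sums.getD k 0, (k : Int)) ∈ (s, (j' : Int)) :: rest := hperm.mem_iff.mpr (by
      simp only [pigPairs, List.mem_map, List.mem_range]
      exact ⟨k, hk, rfl⟩)
    rcases List.mem_cons.mp hmemk with heq | hr
    · exact absurd (by have := congrArg Prod.snd heq; simpa using this) hkj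
    · exact (List.pairwise_cons.mp hpw).1 _ hr
  have hsplit : PySem.List.pyRange 0 ((sums.length : Int)) 1
      = PySem.List.pyRange 0 (j' : Int) 1 ++ (j' : Int) :: PySem.List.pyRange ((j' : Int) + 1) ((sums.length : Int)) 1 := by
    rw [PySem.List.pyRange_one_append 0 (j' : Int) ((sums.length : Int)) (by omega) (by omega),
      PySem.List.pyRange_one_cons (a := (j' : Int)) (b := ((sums.length : Int))) (by omega)]
  rw [hsplit]
  apply pigMin_first
  · intro y hy
    rw [PySem.List.mem_pyRange_one] at hy
    have hylt : y.toNat < j' := by omega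
    have hy' : y = ((y.toNat : Nat) : Int) := by omega
    have hltk := hforall y.toNat (by omega) (by omega)
    have hlt : s < sums.getD y.toNat 0 := by
      rcases hltk with h | ⟨h1, h2⟩
      · exact h
      · exfalso; omega
    rw [hy', PySem.List.pyGetD_natCast, PySem.List.pyGetD_natCast, hs]
    exact hlt
  · intro y hy
    rw [PySem.List.mem_pyRange_one] at hy
    have hy' : y = ((y.toNat : Nat) : Int) := by omega
    have hltk := hforall y.toNat (by omega) (by omega)
    have hle : s ≤ sums.getD y.toNat 0 := by
      rcases hltk with h | ⟨h1, h2⟩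
      · omega
      · omega
    rw [hy', PySem.List.pyGetD_natCast, PySem.List.pyGetD_natCast, hs]
    exact hle

theorem pigPerm_update (sums : List Int) (s : Int) (j : Nat) (rest : List (Int × Int)) (w : Int)
    (hj : j < sums.length) (hs : sums.getD j 0 = s)
    (hperm : ((s, (j : Int)) :: rest).Perm (pigPairs sums)) :
    (pigInsort (w, (j : Int)) rest).Perm (pigPairs (sums.set j w)) := by
  have hjP : j < (pigPairs sums).length := by simpa [pigPairs_length] using hj
  have hdecomp : pigPairs sums
      = (pigPairs sums).take j ++ (s, (j : Int)) :: (pigPairs sums).drop (j + 1) := by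
    conv_lhs => rw [← List.take_append_drop j (pigPairs sums)]
    rw [← List.getElem_cons_drop hjP, pigPairs_getElem sums j hj, hs]
  have hset : pigPairs (sums.set j w)
      = (pigPairs sums).take j ++ (w, (j : Int)) :: (pigPairs sums).drop (j + 1) := by
    rw [pigPairs_set sums j w hj, List.set_eq_take_append_cons_drop, if_pos hjP]
  have hrest : rest.Perm ((pigPairs sums).take j ++ (pigPairs sums).drop (j + 1)) := by
    apply List.Perm.cons_inv (a := (s, (j : Int)))
    exact (hperm.trans (hdecomp ▸ List.Perm.refl _)).trans List.perm_middle
  rw [hset]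
  exact ((pigInsort_perm _ _).trans (hrest.cons _)).trans List.perm_middle.symm

theorem pigLoop_eq (nums : List Int) (n : Int) (order : List Int) :
    ∀ (groups : List (List Int)) (sums : List Int) (queue : List (Int × Int)),
    0 < sums.length → ((sums.length : Int)) = n →
    queue.Perm (pigPairs sums) → queue.Pairwise pigLt →
    (order.foldl (pigLoopA nums n) (groups, sums)).1
      = (order.foldl (pigLoopB nums) (groups, queue)).1 := by
  induction order with
  | nil => intros; rfl
  | cons idx rest_o ih =>
      intro groups sums queue hpos hlen hperm hpw
      have hqlen : queue.length = sums.length := by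
        simpa [pigPairs_length] using hperm.length_eq
      cases queue with
      | nil => exfalso; simp at hqlen; omega
      | cons p qrest =>
        obtain ⟨s, g⟩ := p
        have hg : ∃ j : Nat, g = (j : Int) := by
          have hmem : (s, g) ∈ pigPairs sums := hperm.mem_iff.mp List.mem_cons_self
          simp only [pigPairs, List.mem_map, List.mem_range] at hmem
          obtain ⟨j, _, hpair⟩ := hmem
          exact ⟨j, by have := congrArg Prod.snd hpair; simpa using this.symm⟩
        obtain ⟨j, rfl⟩ := hg
        obtain ⟨hj, hs, hmin⟩ := pigHead sums s j qrest hperm hpw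
        have hA : pigLoopA nums n (groups, sums) idx
            = (PySem.List.pySetD groups (j : Int) (PySem.List.pyGetD groups (j : Int) [] ++ [idx]),
               sums.set j (s + PySem.List.pyGetD nums idx 0)) := by
          simp only [pigLoopA, ← hlen, hmin]
          rw [PySem.List.pyGetD_natCast (xs := sums), hs]
          congr 1
          simp [PySem.List.pySetD, PySem.List.pySet?, PySem.List.pyIdx?, hj]
        have hB : pigLoopB nums (groups, (s, (j : Int)) :: qrest) idx
            = (PySem.List.pySetD groups (j : Int) (PySem.List.pyGetD groups (j : Int) [] ++ [idx]),
               pigInsort (s + PySem.List.pyGetD nums idx 0, (j : Int)) qrest) := rfl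
        simp only [List.foldl_cons, hA, hB]
        exact ih _ _ _ (by simpa using hpos) (by simpa using hlen)
            (pigPerm_update sums s j qrest _ hj hs hperm)
            (pigInsort_pairwise _ _ (List.pairwise_cons.mp hpw).2 (pigRest_snd sums s _ qrest hperm))

theorem pigInit_pairs (k : Nat) :
    (List.range k).map (fun (j : Nat) => ((0 : Int), (j : Int))) = pigPairs (List.replicate k (0 : Int)) := by
  simp only [pigPairs, List.length_replicate]
  apply List.map_congr_left
  intro a ha
  rw [List.getD_replicate _ (List.mem_range.mp ha)]

theorem pig_main (nums : List Int) (n : Int) (hpre : Pre_partition_into_groups nums n) :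
    partition_into_groups nums n = partition_into_groups_alt nums n := by
  unfold Pre_partition_into_groups at hpre
  rcases hpre with hpos | ⟨rfl, hneg⟩
  · obtain ⟨k, rfl⟩ : ∃ k : Nat, n = (k : Int) := ⟨n.toNat, by omega⟩
    have hk : 0 < k := by omega
    simp only [partition_into_groups, partition_into_groups_alt]
    have hq : (PySem.List.pyRange 0 (k : Int) 1).map (fun g => ((0 : Int), g))
        = pigPairs (List.replicate ((k : Int)).toNat (0 : Int)) := by
      rw [PySem.List.pyRange_zero_natCast, List.map_map, Int.toNat_natCast]
      exact pigInit_pairs k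
    exact pigLoop_eq nums (k : Int) _ _ _ _
      (by simp; omega) (by simp)
      (hq ▸ List.Perm.refl _)
      (by
        rw [PySem.List.pyRange_zero_natCast, List.map_map, List.pairwise_map]
        exact List.Pairwise.imp
          (fun {a b} hab => Or.inr ⟨rfl, show ((a : Nat) : Int) < ((b : Nat) : Int) from by exact_mod_cast hab⟩)
          List.pairwise_lt_range)
  · rfl

-- ===== VERDICT (by name: the statement is the Claim_ definition above) =====
theorem partition_into_groups_spec : Claim_equal_partition_into_groups := by
  unfold Claim_equal_partition_into_groups
  intro nums n _ hpre
  unfold Spec_partition_into_groups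
  exact pig_main nums n hpre
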